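-- pv_equiv track=rewrite | github.com/galah92/egtts | src/egtts/validated_decomp.py | _parse_aggregation
-- ===== SOURCE A (Python) =====
-- def _parse_aggregation(response: str) -> dict:
--     """Parse aggregation clauses from response."""
--     agg = {"group_by": "", "order_by": "", "limit": ""}
--
--     for line in response.split("\n"):
--         line = line.strip().lower()
--         if line.startswith("group by:"):
--             agg["group_by"] = line.split(":", 1)[1].strip()
--         elif line.startswith("order by:"):
--             agg["order_by"] = line.split(":", 1)[1].strip()
--         elif line.startswith("limit:"):
--             agg["limit"] = line.split(":", 1)[1].strip()
--
--     return agg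
-- ===== SOURCE B (Python) =====
-- def _parse_aggregation(response: str) -> dict:
--     """Parse aggregation clauses from response."""
--     lines = [ln.strip().lower() for ln in response.split("\n")]
--
--     def last_value(key):
--         # last matching line wins, so scan from the end and take the first hit
--         for ln in reversed(lines):
--             parts = ln.split(":", 1)
--             if len(parts) == 2 and parts[0] == key:
--                 return parts[1].strip()
--         return ""
--
--     return {"group_by": last_value("group by"),
--             "order_by": last_value("order by"),
--             "limit": last_value("limit")}
-- ===== Notes on version B (the rewrite author's own statement) =====
-- stated objective: alternative
-- what changed: A folds forward over all lines mutating a three-key dict via a startswith-elif cascade (last assignment wins); B builds the dict directly, scanning the normalized lines from the end once per key and taking the first line whose text before its first colon equals that key.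
import Mathlib
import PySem

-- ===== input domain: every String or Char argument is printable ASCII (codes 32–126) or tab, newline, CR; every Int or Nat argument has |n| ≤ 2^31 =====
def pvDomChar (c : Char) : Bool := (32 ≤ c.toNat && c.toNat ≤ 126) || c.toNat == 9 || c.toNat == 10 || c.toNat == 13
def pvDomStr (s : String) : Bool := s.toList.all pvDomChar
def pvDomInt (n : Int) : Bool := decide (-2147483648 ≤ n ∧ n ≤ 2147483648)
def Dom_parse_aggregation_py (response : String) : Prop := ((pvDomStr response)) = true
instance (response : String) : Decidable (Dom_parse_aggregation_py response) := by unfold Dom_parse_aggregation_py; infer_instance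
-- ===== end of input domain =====

-- B replaces A's forward fold over a mutable dict (startswith cascade, last assignment wins)
-- by building the dict directly: for each of the three keys, scan the normalized lines from the
-- end and take the first line whose part before the first ':' equals the key (objective: alternative).

-- ===== PORT A =====
-- one loop iteration of A; the `.getD ""` after pyGet? is never reached: whenever a branch is
-- taken the line starts with "…:", so split(":", 1) has a second element (Python raises nowhere).
def pvStepA (agg : PySem.Dict String String) (line : String) : PySem.Dict String String :=
  let l := PySem.Str.lower (PySem.Str.strip line)
  if PySem.Str.startswith l "group by:" then
    agg.insert "group_by" (PySem.Str.strip ((PySem.List.pyGet? ((PySem.Str.splitMax? l ":" 1).getD []) 1).getD ""))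
  else if PySem.Str.startswith l "order by:" then
    agg.insert "order_by" (PySem.Str.strip ((PySem.List.pyGet? ((PySem.Str.splitMax? l ":" 1).getD []) 1).getD ""))
  else if PySem.Str.startswith l "limit:" then
    agg.insert "limit" (PySem.Str.strip ((PySem.List.pyGet? ((PySem.Str.splitMax? l ":" 1).getD []) 1).getD ""))
  else agg

def parse_aggregation_py (response : String) : List (String × String) :=
  (((PySem.Str.split? response "\n").getD []).foldl pvStepA
    ⟨[("group_by", ""), ("order_by", ""), ("limit", "")]⟩).items

-- ===== PORT B =====
-- Source B's `last_value`: scan the reversed line list, return the first hit, else "".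
def pvLastValue (key : String) : List String → String
  | [] => ""
  | ln :: rest =>
    match (PySem.Str.splitMax? ln ":" 1).getD [] with
    | [h, v] => if h = key then PySem.Str.strip v else pvLastValue key rest
    | _ => pvLastValue key rest

def parse_aggregation_py_alt (response : String) : List (String × String) :=
  let lines := ((PySem.Str.split? response "\n").getD []).map
    (fun ln => PySem.Str.lower (PySem.Str.strip ln))
  [("group_by", pvLastValue "group by" lines.reverse),
   ("order_by", pvLastValue "order by" lines.reverse),
   ("limit", pvLastValue "limit" lines.reverse)]

-- ===== PRECONDITION & SPEC =====
def Spec_parse_aggregation_py (response : String) (out : List (String × String)) : Prop := out = parse_aggregation_py_alt response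
instance (response : String) (out : List (String × String)) : Decidable (Spec_parse_aggregation_py response out) := by unfold Spec_parse_aggregation_py; infer_instance

-- ===== CLAIM (what is proved, stated in full; the proofs are below) =====
def Claim_equal_parse_aggregation_py : Prop := ∀ (response : String), Dom_parse_aggregation_py response → Spec_parse_aggregation_py response (parse_aggregation_py response)

-- ===== LEMMAS AND PROOFS =====

-- split a char list at its FIRST ':' (spec function for split(":", 1))
def pvColonSplit : List Char → Option (List Char × List Char)
  | [] => none
  | c :: rest => if c = ':' then some ([], rest)
                 else (pvColonSplit rest).map (fun p => (c :: p.1, p.2))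

lemma pvGo0 (fuel : Nat) (l cur : List Char) (acc : List (List Char)) :
    PySem.Chars.splitOnMax.go [':'] fuel 0 l cur acc = ((cur.reverse ++ l) :: acc).reverse := by
  cases fuel with
  | zero => simp [PySem.Chars.splitOnMax.go]
  | succ f => cases l <;> simp [PySem.Chars.splitOnMax.go]

lemma pvGoMain (l : List Char) : ∀ (fuel : Nat) (cur : List Char) (acc : List (List Char)),
    l.length ≤ fuel →
    PySem.Chars.splitOnMax.go [':'] fuel 1 l cur acc =
      (match pvColonSplit l with
       | none => acc.reverse ++ [cur.reverse ++ l]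
       | some (a, b) => acc.reverse ++ [cur.reverse ++ a, b]) := by
  induction l with
  | nil =>
    intro fuel cur acc _
    cases fuel <;> simp [PySem.Chars.splitOnMax.go, pvColonSplit]
  | cons c rest ih =>
    intro fuel cur acc h
    cases fuel with
    | zero => simp at h
    | succ f =>
      by_cases hc : c = ':'
      · subst hc
        simp [PySem.Chars.splitOnMax.go, List.isPrefixOf, pvColonSplit, pvGo0]
      · have hpre : ([':'] : List Char).isPrefixOf (c :: rest) = false := by
          simp [List.isPrefixOf]
          exact fun h' => (hc h'.symm).elim
        have hrest : rest.length ≤ f := by simp at h; omega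
        simp only [PySem.Chars.splitOnMax.go, hpre]
        rw [ih f (c :: cur) acc hrest]
        simp [pvColonSplit, hc]
        cases hcs : pvColonSplit rest with
        | none => simp
        | some p => cases p; simp

lemma pvSplitOnMax1 (cs : List Char) :
    PySem.Chars.splitOnMax cs [':'] 1 =
      (match pvColonSplit cs with
       | none => [cs]
       | some (a, b) => [a, b]) := by
  unfold PySem.Chars.splitOnMax
  rw [if_neg (by norm_num)]
  have h1 : (1 : Int).toNat = 1 := rfl
  rw [h1, pvGoMain cs (cs.length + 1) [] [] (by omega)]
  cases hcs : pvColonSplit cs with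
  | none => simp
  | some p => cases p; simp

lemma pvSplitMax1Str (l : String) :
    PySem.Str.splitMax? l ":" 1 =
      some (match pvColonSplit l.toList with
            | none => [l]
            | some (a, b) => [String.ofList a, String.ofList b]) := by
  unfold PySem.Str.splitMax? PySem.Chars.splitMax?
  have hc : (":".toList : List Char) = [':'] := by decide
  rw [hc]
  rw [if_neg (by simp)]
  rw [pvSplitOnMax1]
  cases hcs : pvColonSplit l.toList with
  | none => simp
  | some p => cases p; simp

lemma pvColonSplit_sound (l : List Char) : ∀ (a b : List Char),
    pvColonSplit l = some (a, b) → l = a ++ ':' :: b ∧ ':' ∉ a := by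
  induction l with
  | nil => intro a b h; simp [pvColonSplit] at h
  | cons c rest ih =>
    intro a b h
    by_cases hc : c = ':'
    · subst hc
      simp [pvColonSplit] at h
      obtain ⟨h1, h2⟩ := h
      subst h1; subst h2; simp
    · rw [pvColonSplit, if_neg hc] at h
      cases hr : pvColonSplit rest with
      | none => rw [hr] at h; simp at h
      | some p =>
        obtain ⟨a2, b2⟩ := p
        rw [hr] at h
        simp at h
        obtain ⟨h1, h2⟩ := h
        obtain ⟨hrest, hna⟩ := ih a2 b2 hr
        subst h2
        constructor
        · rw [← h1, hrest]; simp
        · rw [← h1]; simp; exact ⟨fun h => hc h.symm, hna⟩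

lemma pvColonSplit_complete (a : List Char) : ∀ (b : List Char), ':' ∉ a →
    pvColonSplit (a ++ ':' :: b) = some (a, b) := by
  induction a with
  | nil => intro b _; simp [pvColonSplit]
  | cons c a' ih =>
    intro b hna
    simp at hna
    rw [List.cons_append, pvColonSplit, if_neg (fun h => hna.1 h.symm)]
    rw [ih b hna.2]
    rfl

lemma pvColonSplit_eq_some (l a b : List Char) :
    pvColonSplit l = some (a, b) ↔ l = a ++ ':' :: b ∧ ':' ∉ a := by
  constructor
  · exact pvColonSplit_sound l a b
  · rintro ⟨h, hna⟩; subst h; exact pvColonSplit_complete a b hna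

lemma pvStartswith_iff (cs kc : List Char) (hk : ':' ∉ kc) :
    PySem.Chars.startswith cs (kc ++ [':']) = true ↔ ∃ b, pvColonSplit cs = some (kc, b) := by
  rw [PySem.Chars.startswith_iff]
  constructor
  · rintro ⟨t, ht⟩
    refine ⟨t, (pvColonSplit_eq_some cs kc t).mpr ⟨?_, hk⟩⟩
    rw [← ht]; simp
  · rintro ⟨b, hb⟩
    rcases (pvColonSplit_eq_some cs kc b).mp hb with ⟨hl, _⟩
    exact ⟨b, by rw [hl]; simp⟩

-- B's per-line update, default-parametrized (proof helper)
def pvUpd (key d l : String) : String :=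
  match (PySem.Str.splitMax? l ":" 1).getD [] with
  | [h, v] => if h = key then PySem.Str.strip v else d
  | _ => d

def pvLastValueD (key d : String) : List String → String
  | [] => d
  | ln :: rest => pvUpd key (pvLastValueD key d rest) ln

lemma pvLastValue_eq (key : String) (ls : List String) :
    pvLastValue key ls = pvLastValueD key "" ls := by
  induction ls with
  | nil => rfl
  | cons ln rest ih =>
    simp only [pvLastValue, pvLastValueD, pvUpd]
    cases hp : (PySem.Str.splitMax? ln ":" 1).getD [] with
    | nil => exact ih
    | cons h t =>
      cases t with
      | nil => exact ih
      | cons v t2 =>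
        cases t2 with
        | nil => split <;> simp [ih]
        | cons _ _ => exact ih

lemma pvOfList_eq_iff (a : List Char) (s : String) : String.ofList a = s ↔ a = s.toList := by
  constructor
  · intro h; rw [← h]; simp
  · intro h; rw [h]; exact String.ofList_toList

-- normalization of one raw line, as both loops perform it
def pvNorm (ln : String) : String := PySem.Str.lower (PySem.Str.strip ln)

-- Dict.insert on the concrete three-key dict, one lemma per key
lemma pvInsG (g o m v : String) :
    PySem.Dict.insert ⟨[("group_by", g), ("order_by", o), ("limit", m)]⟩ "group_by" v =
      (⟨[("group_by", v), ("order_by", o), ("limit", m)]⟩ : PySem.Dict String String) := by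
  simp [PySem.Dict.insert, PySem.Dict.contains]

lemma pvInsO (g o m v : String) :
    PySem.Dict.insert ⟨[("group_by", g), ("order_by", o), ("limit", m)]⟩ "order_by" v =
      (⟨[("group_by", g), ("order_by", v), ("limit", m)]⟩ : PySem.Dict String String) := by
  simp [PySem.Dict.insert, PySem.Dict.contains]

lemma pvInsL (g o m v : String) :
    PySem.Dict.insert ⟨[("group_by", g), ("order_by", o), ("limit", m)]⟩ "limit" v =
      (⟨[("group_by", g), ("order_by", o), ("limit", v)]⟩ : PySem.Dict String String) := by
  simp [PySem.Dict.insert, PySem.Dict.contains]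

-- startswith "<key>:" on the normalized line, decided by the first-colon split
lemma pvSwTrue (l : String) (kc b : List Char) (hk : ':' ∉ kc)
    (hcs : pvColonSplit l.toList = some (kc, b)) :
    PySem.Chars.startswith l.toList (kc ++ [':']) = true :=
  (pvStartswith_iff l.toList kc hk).mpr ⟨b, hcs⟩

lemma pvSwFalse (l : String) (kc : List Char) (hk : ':' ∉ kc)
    (hne : ∀ b, pvColonSplit l.toList ≠ some (kc, b)) :
    PySem.Chars.startswith l.toList (kc ++ [':']) = false := by
  rw [Bool.eq_false_iff]
  intro hcc
  rcases (pvStartswith_iff l.toList kc hk).mp hcc with ⟨b, hb⟩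
  exact hne b hb

-- the heart: one iteration of A's loop equals B's per-key update on the normalized line
lemma pvStepA_eq (x g o m : String) :
    pvStepA ⟨[("group_by", g), ("order_by", o), ("limit", m)]⟩ x =
      ⟨[("group_by", pvUpd "group by" g (pvNorm x)),
        ("order_by", pvUpd "order by" o (pvNorm x)),
        ("limit", pvUpd "limit" m (pvNorm x))]⟩ := by
  unfold pvStepA pvUpd pvNorm
  dsimp only
  set l := PySem.Str.lower (PySem.Str.strip x) with hldef
  rw [pvSplitMax1Str l]
  have hgb : (['g','r','o','u','p',' ','b','y',':'] : List Char) = "group by".toList ++ [':'] := rfl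
  have hob : (['o','r','d','e','r',' ','b','y',':'] : List Char) = "order by".toList ++ [':'] := rfl
  have hli : (['l','i','m','i','t',':'] : List Char) = "limit".toList ++ [':'] := rfl
  cases hcs : pvColonSplit l.toList with
  | none =>
    have hg' : PySem.Chars.startswith l.toList ['g','r','o','u','p',' ','b','y',':'] = false := by
      rw [hgb]; exact pvSwFalse l _ (by decide) (fun b hb => by rw [hcs] at hb; simp at hb)
    have ho' : PySem.Chars.startswith l.toList ['o','r','d','e','r',' ','b','y',':'] = false := by
      rw [hob]; exact pvSwFalse l _ (by decide) (fun b hb => by rw [hcs] at hb; simp at hb)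
    have hl' : PySem.Chars.startswith l.toList ['l','i','m','i','t',':'] = false := by
      rw [hli]; exact pvSwFalse l _ (by decide) (fun b hb => by rw [hcs] at hb; simp at hb)
    simp [hg', ho', hl']
  | some p =>
    obtain ⟨a, b⟩ := p
    by_cases ha : a = "group by".toList
    · have hg' : PySem.Chars.startswith l.toList ['g','r','o','u','p',' ','b','y',':'] = true := by
        rw [hgb]; exact pvSwTrue l _ b (by decide) (by rw [hcs, ha])
      have hofa : String.ofList a = "group by" := by rw [pvOfList_eq_iff]; exact ha
      simp [hg', pvInsG, hofa]
    · by_cases hb : a = "order by".toList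
      · have hg' : PySem.Chars.startswith l.toList ['g','r','o','u','p',' ','b','y',':'] = false := by
          rw [hgb]
          exact pvSwFalse l _ (by decide)
            (fun b' hb' => by rw [hcs] at hb'; simp at hb'; exact ha hb'.1)
        have ho' : PySem.Chars.startswith l.toList ['o','r','d','e','r',' ','b','y',':'] = true := by
          rw [hob]; exact pvSwTrue l _ b (by decide) (by rw [hcs, hb])
        have hofa : ¬ (String.ofList a = "group by") := by rw [pvOfList_eq_iff]; exact ha
        have hofb : String.ofList a = "order by" := by rw [pvOfList_eq_iff]; exact hb
        simp [hg', ho', pvInsO, hofb]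
      · by_cases hc : a = "limit".toList
        · have hg' : PySem.Chars.startswith l.toList ['g','r','o','u','p',' ','b','y',':'] = false := by
            rw [hgb]
            exact pvSwFalse l _ (by decide)
              (fun b' hb' => by rw [hcs] at hb'; simp at hb'; exact ha hb'.1)
          have ho' : PySem.Chars.startswith l.toList ['o','r','d','e','r',' ','b','y',':'] = false := by
            rw [hob]
            exact pvSwFalse l _ (by decide)
              (fun b' hb' => by rw [hcs] at hb'; simp at hb'; exact hb hb'.1)
          have hl' : PySem.Chars.startswith l.toList ['l','i','m','i','t',':'] = true := by
            rw [hli]; exact pvSwTrue l _ b (by decide) (by rw [hcs, hc])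
          have hofa : ¬ (String.ofList a = "group by") := by rw [pvOfList_eq_iff]; exact ha
          have hofb : ¬ (String.ofList a = "order by") := by rw [pvOfList_eq_iff]; exact hb
          have hofc : String.ofList a = "limit" := by rw [pvOfList_eq_iff]; exact hc
          simp [hg', ho', hl', pvInsL, hofc]
        · have hg' : PySem.Chars.startswith l.toList ['g','r','o','u','p',' ','b','y',':'] = false := by
            rw [hgb]
            exact pvSwFalse l _ (by decide)
              (fun b' hb' => by rw [hcs] at hb'; simp at hb'; exact ha hb'.1)
          have ho' : PySem.Chars.startswith l.toList ['o','r','d','e','r',' ','b','y',':'] = false := by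
            rw [hob]
            exact pvSwFalse l _ (by decide)
              (fun b' hb' => by rw [hcs] at hb'; simp at hb'; exact hb hb'.1)
          have hl' : PySem.Chars.startswith l.toList ['l','i','m','i','t',':'] = false := by
            rw [hli]
            exact pvSwFalse l _ (by decide)
              (fun b' hb' => by rw [hcs] at hb'; simp at hb'; exact hc hb'.1)
          have hofa : ¬ (String.ofList a = "group by") := by rw [pvOfList_eq_iff]; exact ha
          have hofb : ¬ (String.ofList a = "order by") := by rw [pvOfList_eq_iff]; exact hb
          have hofc : ¬ (String.ofList a = "limit") := by rw [pvOfList_eq_iff]; exact hc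
          simp [hg', ho', hl', hofa, hofb, hofc]

lemma pvFoldl (ls : List String) : ∀ (g o m : String),
    ls.foldl pvStepA ⟨[("group_by", g), ("order_by", o), ("limit", m)]⟩ =
      ⟨[("group_by", pvLastValueD "group by" g ((ls.map pvNorm).reverse)),
        ("order_by", pvLastValueD "order by" o ((ls.map pvNorm).reverse)),
        ("limit", pvLastValueD "limit" m ((ls.map pvNorm).reverse))]⟩ := by
  induction ls using List.reverseRecOn with
  | nil => intro g o m; simp [pvLastValueD]
  | append_singleton ls x ih =>
    intro g o m
    rw [List.foldl_append, ih]
    simp only [List.foldl_cons, List.foldl_nil]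
    rw [pvStepA_eq]
    simp [pvLastValueD]

theorem parse_aggregation_py_spec : Claim_equal_parse_aggregation_py := by
  intro response _
  unfold Spec_parse_aggregation_py parse_aggregation_py parse_aggregation_py_alt
  rw [pvFoldl]
  unfold pvNorm
  simp [pvLastValue_eq]
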